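-- pv_equiv track=rewrite | github.com/kaif1808/imHungary | scripts/generate_table_subsets.py | parse_tabular
-- ===== SOURCE A (Python) =====
-- def parse_tabular(content: str) -> tuple[list[str], list[list[str]]]:
--     """Extract header and data rows from a LaTeX tabular."""
--     lines = content.strip().split("\n")
--     header = None
--     rows = []
--     in_table = False
--     for line in lines:
--         if "\\toprule" in line:
--             in_table = True
--             continue
--         if "\\midrule" in line:
--             continue
--         if "\\bottomrule" in line or "\\end{tabular}" in line:
--             break
--         if in_table and "&" in line:
--             cells = [c.strip().rstrip("\\") for c in line.split("&")]
--             if header is None: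
--                 header = cells
--             else:
--                 rows.append(cells)
--     return header or [], rows
-- ===== SOURCE B (Python) =====
-- def parse_tabular(content: str) -> tuple[list[str], list[list[str]]]:
--     """Extract header and data rows from a LaTeX tabular (explicit-region version)."""
--     lines = content.strip().split("\n")
--     start = next((i for i, l in enumerate(lines) if "\\toprule" in l), None)
--     if start is None:
--         return [], []
--     end = next((i for i, l in enumerate(lines)
--                 if "\\bottomrule" in l or "\\end{tabular}" in l), len(lines))
--     data = [[c.strip().rstrip("\\") for c in l.split("&")]
--             for l in lines[start + 1:end]
--             if "&" in l and "\\midrule" not in l]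
--     return (data[0] if data else []), data[1:]
-- ===== Notes on version B (the rewrite author's own statement) =====
-- stated objective: simpler
-- what changed: Replaces the stateful scan (in_table flag, break, header-None sentinel) by an explicit computation of the table region: first \toprule index, first \bottomrule/\end{tabular} index, slice between them, keep ampersand data lines that are not \midrule, split into cells, first kept line is the header. Pre_ excludes malformed LaTeX in which one line carries both a rule marker (\toprule/\midrule) and a terminator, or \toprule occurs on more than one line: no caller specifies which marker such a line counts as, and A's reading and B's reading are equally defensible.
-- outside the precondition, e.g. on parse_tabular('\\toprule\\bottomrule\na&b'): A returns (['a', 'b'], []), B returns ([], [])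
import Mathlib
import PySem

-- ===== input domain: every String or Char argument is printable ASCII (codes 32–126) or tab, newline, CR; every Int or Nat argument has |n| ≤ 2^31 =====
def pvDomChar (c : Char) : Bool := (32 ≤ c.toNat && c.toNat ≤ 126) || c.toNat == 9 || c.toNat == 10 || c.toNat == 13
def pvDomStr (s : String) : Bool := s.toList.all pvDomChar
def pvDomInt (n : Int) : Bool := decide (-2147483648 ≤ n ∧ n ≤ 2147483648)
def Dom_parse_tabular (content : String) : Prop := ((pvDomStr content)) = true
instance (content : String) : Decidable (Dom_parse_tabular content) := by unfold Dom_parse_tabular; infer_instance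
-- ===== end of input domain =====

-- B replaces A's stateful scan (in_table flag, break, header sentinel) by an explicit
-- region computation (first-\toprule index, first-terminator index, slice, filter, split);
-- objective: simpler.

-- Shared helpers: the cell comprehension `[c.strip().rstrip("\\") for c in line.split("&")]`
-- appears verbatim in both Pythons, and the line predicates are shared substring tests.
-- `.rstrip("\\")` (strip all trailing backslashes) is ported by hand (exact: the char set is the single char '\').
def pvCell (c : String) : String :=
  String.ofList (((PySem.Str.strip c).toList.reverse.dropWhile (fun ch => ch == '\\')).reverse)

def pvCells (line : String) : List String :=
  ((PySem.Str.split? line "&").getD []).map pvCell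

def pvT (l : String) : Bool := PySem.Str.isIn "\\toprule" l
def pvM (l : String) : Bool := PySem.Str.isIn "\\midrule" l
def pvE (l : String) : Bool := PySem.Str.isIn "\\bottomrule" l || PySem.Str.isIn "\\end{tabular}" l

-- ===== PORT A =====
def pvLoopA : List String → Option (List String) → List (List String) → Bool →
    Option (List String) × List (List String)
  | [], header, rows, _ => (header, rows)
  | l :: ls, header, rows, inT =>
    if pvT l then pvLoopA ls header rows true
    else if pvM l then pvLoopA ls header rows inT
    else if pvE l then (header, rows)
    else if inT && PySem.Str.isIn "&" l then
      match header with
      | none => pvLoopA ls (some (pvCells l)) rows inT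
      | some _ => pvLoopA ls header (rows ++ [pvCells l]) inT
    else pvLoopA ls header rows inT

def pvA (lines : List String) : List String × List (List String) :=
  let (header, rows) := pvLoopA lines none [] false
  (header.getD [], rows)

def parse_tabular (content : String) : List String × List (List String) :=
  pvA ((PySem.Str.split? (PySem.Str.strip content) "\n").getD [])

-- ===== PORT B =====
def pvData (l : String) : Bool := PySem.Str.isIn "&" l && !pvM l

def pvAlt (lines : List String) : List String × List (List String) :=
  match lines.findIdx? pvT with
  | none => ([], [])
  | some s =>
    let e : Nat := (lines.findIdx? pvE).getD lines.length
    let data := ((PySem.List.slice lines (some ((s : Int) + 1)) (some (e : Int))).filter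
        pvData).map pvCells
    (data.headD [], data.tail)

def parse_tabular_alt (content : String) : List String × List (List String) :=
  pvAlt ((PySem.Str.split? (PySem.Str.strip content) "\n").getD [])

-- ===== PRECONDITION & SPEC =====
-- Pre_ excludes malformed LaTeX in which one line carries both a rule marker
-- (\toprule/\midrule) and a terminator (\bottomrule/\end{tabular}), or in which \toprule
-- occurs on more than one line: no caller specifies which marker such a line counts as,
-- and A's reading and B's reading are equally defensible there.
def Pre_parse_tabular (content : String) : Prop :=
  let lines := (PySem.Str.split? (PySem.Str.strip content) "\n").getD []
  lines.countP pvT ≤ 1 ∧ lines.all (fun l => !((pvT l || pvM l) && pvE l)) = true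
instance (content : String) : Decidable (Pre_parse_tabular content) := by
  unfold Pre_parse_tabular; infer_instance

def pvWitness_parse_tabular : String := "\\toprule\na & b\\\\\nc & d\n\\bottomrule"

def Spec_parse_tabular (content : String) (out : List String × List (List String)) : Prop := out = parse_tabular_alt content
instance (content : String) (out : List String × List (List String)) : Decidable (Spec_parse_tabular content out) := by unfold Spec_parse_tabular; infer_instance

-- ===== CLAIM (what is proved, stated in full; the proofs are below) =====
def Claim_equal_parse_tabular : Prop := ∀ (content : String), Dom_parse_tabular content → Pre_parse_tabular content → Spec_parse_tabular content (parse_tabular content)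

-- ===== LEMMAS AND PROOFS =====

-- the prefix up to the first terminator line is the terminator-free prefix
theorem pv_take_findIdx (ls : List String) :
    ls.take ((ls.findIdx? pvE).getD ls.length) = ls.takeWhile (fun l => !pvE l) := by
  induction ls with
  | nil => simp
  | cons l ls ih =>
    rw [List.findIdx?_cons]
    by_cases h : pvE l
    · simp [h]
    · simp only [h, List.takeWhile_cons, Bool.not_false, if_true]
      cases hfi : ls.findIdx? pvE <;>
        simp [hfi, List.take_succ_cons, ← ih]

-- A's loop after the header is found, on toprule-free lines without mixed-marker lines
theorem pvLoopA_some (ls : List String) (hd : List String) (rows : List (List String))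
    (hNoT : ∀ l ∈ ls, pvT l = false) (hME : ∀ l ∈ ls, (pvM l && pvE l) = false) :
    pvLoopA ls (some hd) rows true =
      (some hd, rows ++ ((ls.takeWhile (fun l => !pvE l)).filter pvData).map pvCells) := by
  induction ls generalizing rows with
  | nil => simp [pvLoopA]
  | cons l ls ih =>
    have hT : pvT l = false := hNoT l (by simp)
    have hNoT' : ∀ l ∈ ls, pvT l = false := fun x hx => hNoT x (by simp [hx])
    have hME' : ∀ l ∈ ls, (pvM l && pvE l) = false := fun x hx => hME x (by simp [hx])
    have ih' := fun r => ih r hNoT' hME'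
    by_cases hM : pvM l
    · have hE : pvE l = false := by have := hME l (by simp); simpa [hM] using this
      have hQ : pvData l = false := by simp [pvData, hM]
      simp [pvLoopA, hT, hM, hE, hQ, ih']
    · by_cases hE : pvE l
      · simp [pvLoopA, hT, hM, hE]
      · by_cases hAmp : PySem.Chars.isIn ['&'] l.toList = true
        · have hQ : pvData l = true := by simp [pvData, hAmp, hM]
          simp [pvLoopA, hT, hM, hE, hAmp, hQ, ih']
        · have hQ : pvData l = false := by simp [pvData, hAmp]
          simp [pvLoopA, hT, hM, hE, hAmp, hQ, ih']

-- A's loop just after \toprule: the first kept data line becomes the header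
theorem pvLoopA_none (ls : List String)
    (hNoT : ∀ l ∈ ls, pvT l = false) (hME : ∀ l ∈ ls, (pvM l && pvE l) = false) :
    pvLoopA ls none [] true =
      (match ((ls.takeWhile (fun l => !pvE l)).filter pvData).map pvCells with
        | [] => (none, [])
        | c :: cs => (some c, cs)) := by
  induction ls with
  | nil => simp [pvLoopA]
  | cons l ls ih =>
    have hT : pvT l = false := hNoT l (by simp)
    have hNoT' : ∀ l ∈ ls, pvT l = false := fun x hx => hNoT x (by simp [hx])
    have hME' : ∀ l ∈ ls, (pvM l && pvE l) = false := fun x hx => hME x (by simp [hx])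
    by_cases hM : pvM l
    · have hE : pvE l = false := by have := hME l (by simp); simpa [hM] using this
      have hQ : pvData l = false := by simp [pvData, hM]
      simp [pvLoopA, hT, hM, hE, hQ, ih hNoT' hME']
    · by_cases hE : pvE l
      · simp [pvLoopA, hT, hM, hE]
      · by_cases hAmp : PySem.Chars.isIn ['&'] l.toList = true
        · have hQ : pvData l = true := by simp [pvData, hAmp, hM]
          simp [pvLoopA, hT, hM, hE, hAmp, hQ, pvLoopA_some ls _ _ hNoT' hME']
        · have hQ : pvData l = false := by simp [pvData, hAmp]
          simp [pvLoopA, hT, hM, hE, hAmp, hQ, ih hNoT' hME']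

-- the slice in B, for Nat bounds, is take ∘ drop
theorem pv_slice_nat (xs : List String) (a b : Nat) :
    PySem.List.slice xs (some (a : Int)) (some (b : Int)) = (xs.drop a).take (b - a) := by
  rw [PySem.List.slice_toNat xs (by positivity) (by positivity)]
  simp

-- the getD-of-findIdx? bound steps through a non-terminator head
theorem pv_findIdx_getD_cons (l : String) (ls : List String) (h : pvE l = false) :
    (((l :: ls).findIdx? pvE).getD (l :: ls).length)
      = ((ls.findIdx? pvE).getD ls.length) + 1 := by
  rw [List.findIdx?_cons]
  cases hfi : ls.findIdx? pvE <;> simp [h]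

-- main: the two line-level computations agree on Pre_'s lines
theorem pvA_eq_pvAlt (lines : List String)
    (hCnt : lines.countP pvT ≤ 1)
    (hCross : ∀ l ∈ lines, ((pvT l || pvM l) && pvE l) = false) :
    pvA lines = pvAlt lines := by
  induction lines with
  | nil => simp [pvA, pvAlt, pvLoopA]
  | cons l ls ih =>
    have hCross' : ∀ x ∈ ls, ((pvT x || pvM x) && pvE x) = false :=
      fun x hx => hCross x (by simp [hx])
    have hME' : ∀ x ∈ ls, (pvM x && pvE x) = false := by
      intro x hx
      have := hCross' x hx
      cases hm : pvM x <;> cases he : pvE x <;> simp_all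
    by_cases hT : pvT l
    · -- \toprule found at index 0: A enters the table, B slices from index 1
      have hE : pvE l = false := by have := hCross l (by simp); simpa [hT] using this
      have hNoT' : ∀ x ∈ ls, pvT x = false := by
        have : ls.countP pvT = 0 := by
          have h := hCnt
          rw [List.countP_cons] at h
          simp only [hT, if_true] at h
          omega
        intro x hx
        exact Bool.of_not_eq_true (List.countP_eq_zero.mp this x hx)
      unfold pvA pvAlt
      rw [show pvLoopA (l :: ls) none [] false = pvLoopA ls none [] true from by
        simp [pvLoopA, hT]]
      rw [pvLoopA_none ls hNoT' hME']
      rw [show (l :: ls).findIdx? pvT = some 0 from by simp [List.findIdx?_cons, hT]]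
      dsimp only
      rw [pv_findIdx_getD_cons l ls hE]
      rw [show (((0 : Nat)) : Int) + 1 = (((1 : Nat)) : Int) from by norm_num]
      rw [pv_slice_nat]
      simp only [List.drop_one, List.tail_cons, Nat.add_sub_cancel]
      rw [pv_take_findIdx]
      cases hcs : (List.filter pvData (ls.takeWhile (fun l => !pvE l))).map pvCells <;>
        simp
    · by_cases hE : pvE l
      · -- terminator at index 0: A breaks immediately, B's region is empty
        have hM : pvM l = false := by
          have := hCross l (by simp); cases hm : pvM l <;> simp_all
        unfold pvA pvAlt
        rw [show pvLoopA (l :: ls) none [] false = (none, []) from by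
          simp [pvLoopA, hT, hM, hE]]
        rw [show (l :: ls).findIdx? pvE = some 0 from by simp [List.findIdx?_cons, hE]]
        rw [show (l :: ls).findIdx? pvT = (ls.findIdx? pvT).map (· + 1) from by
          simp [List.findIdx?_cons, hT]]
        cases hfT : ls.findIdx? pvT with
        | none => simp
        | some s =>
          dsimp only [Option.map_some, Option.getD_some]
          rw [show (((s + 1 : Nat)) : Int) + 1 = (((s + 2 : Nat)) : Int) from by push_cast; ring]
          rw [pv_slice_nat]
          simp
      · -- ordinary line before the table: both sides ignore it
        have hCnt' : ls.countP pvT ≤ 1 := by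
          rw [List.countP_cons] at hCnt; simp [hT] at hCnt; exact hCnt
        have hskip : pvLoopA (l :: ls) none [] false = pvLoopA ls none [] false := by
          by_cases hM : pvM l
          · simp [pvLoopA, hT, hM]
          · simp [pvLoopA, hT, hM, hE]
        have hAstep : pvA (l :: ls) = pvA ls := by unfold pvA; rw [hskip]
        rw [hAstep, ih hCnt' hCross']
        unfold pvAlt
        rw [show (l :: ls).findIdx? pvT = (ls.findIdx? pvT).map (· + 1) from by
          simp [List.findIdx?_cons, hT]]
        cases hfT : ls.findIdx? pvT with
        | none => simp
        | some s =>
          dsimp only [Option.map_some, Option.getD_some]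
          rw [pv_findIdx_getD_cons l ls (by simpa using hE)]
          rw [show (((s + 1 : Nat)) : Int) + 1 = (((s + 2 : Nat)) : Int) from by push_cast; ring]
          rw [show (((s : Nat)) : Int) + 1 = (((s + 1 : Nat)) : Int) from by push_cast; ring]
          rw [pv_slice_nat, pv_slice_nat]
          simp only [List.drop_succ_cons]
          rw [show (ls.findIdx? pvE).getD ls.length + 1 - (s + 2)
                = (ls.findIdx? pvE).getD ls.length - (s + 1) from by omega]

-- ===== VERDICT (by name: the statement is the Claim_ definition above) =====
theorem parse_tabular_spec : Claim_equal_parse_tabular := by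
  intro content _ hpre
  unfold Pre_parse_tabular at hpre
  obtain ⟨h1, h2⟩ := hpre
  show _ = _
  unfold parse_tabular parse_tabular_alt
  refine pvA_eq_pvAlt _ h1 ?_
  intro l hl
  have h := List.all_eq_true.mp h2 l hl
  cases ht : pvT l <;> cases hm : pvM l <;> cases he : pvE l <;> simp_all
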